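-- pv_equiv track=rewrite | github.com/ncardamone10/Instrument-Drivers | src/Rigol/DHO924S/Config/convertTomlToPythonDataClass.py | analyze_syntax_for_set_query
-- ===== SOURCE A (Python) =====
-- def extract_scpi_tokens(syntax_str):
--     """
--     Example: ":ACQuire:AVERages <count> :ACQuire:AVERages?"
--       -> [":ACQuire:AVERages", ":ACQuire:AVERages?"]
--     """
--     return [t.strip() for t in syntax_str.split() if t.strip().startswith(":")]
--
-- def analyze_syntax_for_set_query(syntax):
--     """
--     from a syntax line (like ':ACQuire:AVERages <count> :ACQuire:AVERages?'),
--     see if we have a set_cmd (non-? token) and query_cmd (? token).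
--     """
--     tokens = extract_scpi_tokens(syntax)
--     set_cmd = None
--     query_cmd = None
--     for t in tokens:
--         if t.endswith("?"):
--             query_cmd = t
--         else:
--             set_cmd = t
--     return set_cmd, query_cmd
-- ===== SOURCE B (Python) =====
-- def analyze_syntax_for_set_query(syntax):
--     """
--     Single reverse pass over the whitespace-split words, with no intermediate
--     token list: each slot is written at most once (write-once semantics gives
--     the LAST token of each class), and the scan stops early as soon as both
--     slots are filled.
--     """
--     set_cmd = None
--     query_cmd = None
--     for w in reversed(syntax.split()):
--         t = w.strip()
--         if not t.startswith(":"):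
--             continue
--         if t.endswith("?"):
--             if query_cmd is None:
--                 query_cmd = t
--         elif set_cmd is None:
--             set_cmd = t
--         if set_cmd is not None and query_cmd is not None:
--             break
--     return set_cmd, query_cmd
-- ===== Notes on version B (the rewrite author's own statement) =====
-- stated objective: alternative
-- what changed: Replaces A's forward loop that builds a token list and overwrites both slots on every matching token with a single reverse pass over the split words (no intermediate token list) using write-once slots and an early break once both commands are found.
import Mathlib
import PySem

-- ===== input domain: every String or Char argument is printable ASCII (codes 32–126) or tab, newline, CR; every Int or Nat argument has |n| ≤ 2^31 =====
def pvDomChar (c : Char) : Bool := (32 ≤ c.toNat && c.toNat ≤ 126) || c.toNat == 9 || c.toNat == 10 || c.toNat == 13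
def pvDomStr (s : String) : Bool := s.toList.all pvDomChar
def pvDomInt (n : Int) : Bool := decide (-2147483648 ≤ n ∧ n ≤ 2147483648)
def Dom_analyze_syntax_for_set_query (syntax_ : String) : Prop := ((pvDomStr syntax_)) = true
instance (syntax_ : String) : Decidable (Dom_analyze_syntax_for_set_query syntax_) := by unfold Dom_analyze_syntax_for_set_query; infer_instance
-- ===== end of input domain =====

-- B replaces A's token-list build + forward overwrite loop with a single reverse
-- pass over the split words, write-once slots and an early break; same values,
-- alternative decomposition (no speed claim).

-- ===== PORT A =====
-- [t.strip() for t in syntax_str.split() if t.strip().startswith(":")]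
def extract_scpi_tokens (syntax_str : String) : List String :=
  (PySem.Str.split₀ syntax_str).filterMap (fun t =>
    if PySem.Str.startswith (PySem.Str.strip t) ":" then some (PySem.Str.strip t) else none)

-- forward loop: query_cmd / set_cmd overwritten on each token of its class
def analyze_syntax_for_set_query (syntax_ : String) : Option String × Option String :=
  let tokens := extract_scpi_tokens syntax_
  tokens.foldl (fun st t =>
    if PySem.Str.endswith t "?" then (st.1, some t) else (some t, st.2))
    (none, none)

-- ===== PORT B =====
-- the reverse loop of Source B: skip non-':' words, fill the empty slot of the
-- token's class (write-once), break early once both slots are filled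
def pvGoB (s q : Option String) : List String → Option String × Option String
  | [] => (s, q)
  | w :: ws =>
    let t := PySem.Str.strip w
    if PySem.Str.startswith t ":" then
      let s' := if PySem.Str.endswith t "?" then s else s.or (some t)
      let q' := if PySem.Str.endswith t "?" then q.or (some t) else q
      if s'.isSome && q'.isSome then (s', q') else pvGoB s' q' ws
    else pvGoB s q ws

def analyze_syntax_for_set_query_alt (syntax_ : String) : Option String × Option String :=
  pvGoB none none (PySem.Str.split₀ syntax_).reverse

-- ===== PRECONDITION & SPEC =====
def Spec_analyze_syntax_for_set_query (syntax_ : String) (out : Option String × Option String) : Prop := out = analyze_syntax_for_set_query_alt syntax_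
instance (syntax_ : String) (out : Option String × Option String) : Decidable (Spec_analyze_syntax_for_set_query syntax_ out) := by unfold Spec_analyze_syntax_for_set_query; infer_instance

-- ===== CLAIM (what is proved, stated in full; the proofs are below) =====
def Claim_equal_analyze_syntax_for_set_query : Prop := ∀ (syntax_ : String), Dom_analyze_syntax_for_set_query syntax_ → Spec_analyze_syntax_for_set_query syntax_ (analyze_syntax_for_set_query syntax_)

-- ===== LEMMAS AND PROOFS =====

-- the colon-token extraction, as a function of a word list
def pvCT (ws : List String) : List String :=
  ws.filterMap (fun t =>
    if PySem.Str.startswith (PySem.Str.strip t) ":" then some (PySem.Str.strip t) else none)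

-- invariant of A's loop: each component is the last matching token, falling back to the accumulator
theorem pv_fold_eq (ts : List String) (a b : Option String) :
    ts.foldl (fun st t =>
        if PySem.Str.endswith t "?" then (st.1, some t) else (some t, st.2)) (a, b)
    = ((ts.reverse.find? (fun t => ! PySem.Str.endswith t "?")).or a,
       (ts.reverse.find? (fun t => PySem.Str.endswith t "?")).or b) := by
  induction ts generalizing a b with
  | nil => simp
  | cons t ts ih =>
    simp only [List.foldl_cons, List.reverse_cons, List.find?_append]
    by_cases h : PySem.Str.endswith t "?" = true
    · have h' : PySem.Chars.endswith t.toList ['?'] = true := by simpa using h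
      rw [if_pos h, ih]
      simp [List.find?, h']
    · have h' : PySem.Chars.endswith t.toList ['?'] = false := by simpa using h
      rw [if_neg h, ih]
      simp [List.find?, h']

-- invariant of B's loop: write-once slots with early exit compute, for each class,
-- the accumulator if set, otherwise the FIRST matching colon-token of the remaining words
theorem pv_goB_eq (ws : List String) (s q : Option String) :
    pvGoB s q ws
    = (s.or ((pvCT ws).find? (fun t => ! PySem.Str.endswith t "?")),
       q.or ((pvCT ws).find? (fun t => PySem.Str.endswith t "?"))) := by
  induction ws generalizing s q with
  | nil => simp [pvGoB, pvCT]
  | cons w ws ih =>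
    simp only [pvGoB]
    by_cases hc : PySem.Str.startswith (PySem.Str.strip w) ":" = true
    · have hc' : PySem.Chars.startswith (PySem.Chars.strip w.toList) [':'] = true := by
        simpa using hc
      rw [if_pos hc]
      by_cases h : PySem.Str.endswith (PySem.Str.strip w) "?" = true
      · have h' : PySem.Chars.endswith (PySem.Chars.strip w.toList) ['?'] = true := by
          simpa using h
        simp only [if_pos h]
        by_cases hb : (s.isSome && (q.or (some (PySem.Str.strip w))).isSome) = true
        · rw [if_pos hb]
          cases s <;> cases q <;>
            simp_all [pvCT]
        · rw [if_neg hb, ih]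
          cases s <;> cases q <;>
            simp_all [pvCT]
      · have h' : PySem.Chars.endswith (PySem.Chars.strip w.toList) ['?'] = false := by
          simpa using h
        simp only [if_neg h]
        by_cases hb : ((s.or (some (PySem.Str.strip w))).isSome && q.isSome) = true
        · rw [if_pos hb]
          cases s <;> cases q <;>
            simp_all [pvCT]
        · rw [if_neg hb, ih]
          cases s <;> cases q <;>
            simp_all [pvCT]
    · have hc' : PySem.Chars.startswith (PySem.Chars.strip w.toList) [':'] = false := by
        simpa using hc
      rw [if_neg hc, ih]
      simp [pvCT, hc']

-- the extraction commutes with reversal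
theorem pv_ct_reverse (ws : List String) : pvCT ws.reverse = (pvCT ws).reverse := by
  simp [pvCT, List.filterMap_reverse]

-- ===== VERDICT (by name: the statement is the Claim_ definition above) =====
theorem analyze_syntax_for_set_query_spec : Claim_equal_analyze_syntax_for_set_query := by
  intro s _
  unfold Spec_analyze_syntax_for_set_query analyze_syntax_for_set_query
    analyze_syntax_for_set_query_alt extract_scpi_tokens
  rw [pv_fold_eq, pv_goB_eq, pv_ct_reverse]
  simp [pvCT]
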